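-- pv_equiv track=rewrite | github.com/beelsebob/MinecraftCurve | Curve.py | pixels_to_bitmap
-- ===== SOURCE A (Python) =====
-- def pixels_to_bitmap(pixels):
--
--     xs = [p[0] for p in pixels]
--     ys = [p[1] for p in pixels]
--
--     minx, maxx = min(xs), max(xs)
--     miny, maxy = min(ys), max(ys)
--
--     w = maxx - minx + 1
--     h = maxy - miny + 1
--
--     bmp = [[0] * w for _ in range(h)]
--
--     for x, y in pixels:
--         bmp[y - miny][x - minx] = 1
--
--     # Return offset too
--     return bmp, minx, miny
-- ===== SOURCE B (Python) =====
-- def pixels_to_bitmap(pixels):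
--     x0, y0 = pixels[0]
--     minx = maxx = x0
--     miny = maxy = y0
--     for x, y in pixels[1:]:
--         if x < minx: minx = x
--         if x > maxx: maxx = x
--         if y < miny: miny = y
--         if y > maxy: maxy = y
--     pts = {(x, y) for x, y in pixels}
--     bmp = [[1 if (x, y) in pts else 0 for x in range(minx, maxx + 1)]
--            for y in range(miny, maxy + 1)]
--     return bmp, minx, miny
-- ===== Notes on version B (the rewrite author's own statement) =====
-- stated objective: alternative
-- what changed: A computes the bounding box with four separate min/max passes over projected coordinate lists and writes targeted 1s into a preallocated zero grid; B finds all four bounds in one fold over the pixels and then fills every cell of the bounding box by membership test against a coordinate set, inverting the traversal from the n pixels to the w*h cells.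
import Mathlib
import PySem

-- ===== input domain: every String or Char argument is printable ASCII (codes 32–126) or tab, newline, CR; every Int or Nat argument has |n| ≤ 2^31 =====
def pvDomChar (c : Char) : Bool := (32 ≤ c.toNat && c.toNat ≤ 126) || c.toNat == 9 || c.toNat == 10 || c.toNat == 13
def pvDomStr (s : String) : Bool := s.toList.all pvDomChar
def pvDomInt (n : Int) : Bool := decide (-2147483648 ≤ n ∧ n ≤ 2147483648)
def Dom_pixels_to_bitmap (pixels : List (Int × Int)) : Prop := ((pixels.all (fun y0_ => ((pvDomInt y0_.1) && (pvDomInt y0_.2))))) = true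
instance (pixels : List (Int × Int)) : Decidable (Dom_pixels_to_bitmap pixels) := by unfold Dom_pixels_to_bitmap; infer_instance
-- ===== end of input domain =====

-- B computes all four bounding-box bounds in one fold and fills every grid cell by a
-- membership test against a coordinate set, instead of A's four min/max passes plus
-- targeted writes into a preallocated zero grid (objective: alternative).

-- ===== PORT A =====
def pixels_to_bitmap (pixels : List (Int × Int)) : List (List Int) × Int × Int :=
  let xs := pixels.map (fun p => p.1)
  let ys := pixels.map (fun p => p.2)
  let minx := (PySem.List.min? xs (fun v => v)).getD 0
  let maxx := (PySem.List.max? xs (fun v => v)).getD 0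
  let miny := (PySem.List.min? ys (fun v => v)).getD 0
  let maxy := (PySem.List.max? ys (fun v => v)).getD 0
  let w := maxx - minx + 1
  let h := maxy - miny + 1
  let bmp0 := List.replicate h.toNat (List.replicate w.toNat (0 : Int))
  -- bmp[y - miny][x - minx] = 1: on every nonempty input both indices are ≥ 0 and in range
  -- (min/max bounds), so Nat-indexed modify/set is exact here.
  let bmp := pixels.foldl
    (fun b p => b.modify (p.2 - miny).toNat (fun row => row.set (p.1 - minx).toNat 1)) bmp0
  (bmp, minx, miny)

-- ===== PORT B =====
/-- one step of B's bounds loop: the four `if` updates of the Python `for x, y in pixels[1:]` body -/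
def pvBounds (acc : Int × Int × Int × Int) (p : Int × Int) : Int × Int × Int × Int :=
  let mnx := if p.1 < acc.1 then p.1 else acc.1
  let mxx := if acc.2.1 < p.1 then p.1 else acc.2.1
  let mny := if p.2 < acc.2.2.1 then p.2 else acc.2.2.1
  let mxy := if acc.2.2.2 < p.2 then p.2 else acc.2.2.2
  (mnx, mxx, mny, mxy)

def pixels_to_bitmap_alt (pixels : List (Int × Int)) : List (List Int) × Int × Int :=
  match pixels with
  | [] => ([], 0, 0)  -- Python raises IndexError on pixels[0] here; excluded by Pre_
  | (x0, y0) :: rest =>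
    let b := rest.foldl pvBounds (x0, x0, y0, y0)
    let pts : PySem.Set (Int × Int) := PySem.Set.ofList pixels
    let bmp := (PySem.List.pyRange b.2.2.1 (b.2.2.2 + 1) 1).map (fun y =>
      (PySem.List.pyRange b.1 (b.2.1 + 1) 1).map (fun x =>
        if ((x, y) : Int × Int) ∈ pts then (1 : Int) else 0))
    (bmp, b.1, b.2.2.1)

-- ===== PRECONDITION & SPEC =====
-- Pre_ excludes only the empty list, on which A raises ValueError (min of an empty sequence);
-- B raises there too (IndexError on pixels[0]).
def Pre_pixels_to_bitmap (pixels : List (Int × Int)) : Prop := pixels ≠ []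
instance (pixels : List (Int × Int)) : Decidable (Pre_pixels_to_bitmap pixels) := by
  unfold Pre_pixels_to_bitmap; infer_instance

def pvWitness_pixels_to_bitmap : (List (Int × Int)) := [(2, -1), (3, 0)]

def Spec_pixels_to_bitmap (pixels : List (Int × Int)) (out : List (List Int) × Int × Int) : Prop := out = pixels_to_bitmap_alt pixels
instance (pixels : List (Int × Int)) (out : List (List Int) × Int × Int) : Decidable (Spec_pixels_to_bitmap pixels out) := by unfold Spec_pixels_to_bitmap; infer_instance

-- ===== CLAIM (what is proved, stated in full; the proofs are below) =====
def Claim_equal_pixels_to_bitmap : Prop := ∀ (pixels : List (Int × Int)), Dom_pixels_to_bitmap pixels → Pre_pixels_to_bitmap pixels → Spec_pixels_to_bitmap pixels (pixels_to_bitmap pixels)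

-- ===== LEMMAS AND PROOFS =====

/-- B's single fold computes the same four running extrema as four separate min/max folds. -/
lemma pvBounds_foldl (rest : List (Int × Int)) : ∀ (a b c d : Int),
    rest.foldl pvBounds (a, b, c, d)
      = ((rest.map Prod.fst).foldl min a, (rest.map Prod.fst).foldl max b,
         (rest.map Prod.snd).foldl min c, (rest.map Prod.snd).foldl max d) := by
  induction rest with
  | nil => intro a b c d; simp
  | cons p t ih =>
    intro a b c d
    have hstep : pvBounds (a, b, c, d) p = (min a p.1, max b p.1, min c p.2, max d p.2) := by
      simp only [pvBounds, min_def, max_def]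
      refine Prod.ext ?_ (Prod.ext ?_ (Prod.ext ?_ ?_)) <;> simp <;> split_ifs <;> omega
    simp only [List.foldl_cons, List.map_cons, hstep, ih]

/-- grid entry read with defaults (total, used only at in-range indices) -/
def pvEntry (g : List (List Int)) (r c : Nat) : Int := (g.getD r []).getD c 0

lemma pvEntry_modify_set (g : List (List Int)) (w r c r0 c0 : Nat)
    (hw : ∀ row ∈ g, row.length = w) (hr : r < g.length) (hc : c < w)
    (_hr0 : r0 < g.length) (hc0 : c0 < w) :
    pvEntry (g.modify r0 (fun row => row.set c0 1)) r c
      = if r = r0 ∧ c = c0 then 1 else pvEntry g r c := by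
  have hrow : ∀ (k : Nat) (hk : k < g.length), g[k].length = w := by
    intro k hk; exact hw _ (List.getElem_mem hk)
  unfold pvEntry
  by_cases h : r0 = r
  · subst h
    by_cases hc' : c0 = c
    · subst hc'
      simp [List.getD_eq_getElem?_getD, List.getElem?_eq_getElem hr, hrow _ hr, hc0]
    · simp [List.getD_eq_getElem?_getD, List.getElem?_eq_getElem hr, hc',
            (show ¬ c = c0 from fun hx => hc' hx.symm)]
  · have hne : ¬ (r = r0 ∧ c = c0) := fun hx => h hx.1.symm
    simp [List.getD_eq_getElem?_getD, h, hne]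

lemma pv_mark (minx miny : Int) (w : Nat) (l : List (Int × Int)) :
    ∀ (g : List (List Int)),
    (∀ row ∈ g, row.length = w) →
    (∀ p ∈ l, minx ≤ p.1 ∧ (p.1 - minx).toNat < w ∧ miny ≤ p.2 ∧ (p.2 - miny).toNat < g.length) →
    (List.foldl (fun b p => b.modify (p.2 - miny).toNat (fun row => row.set (p.1 - minx).toNat 1)) g l).length = g.length ∧
    (∀ row ∈ List.foldl (fun b p => b.modify (p.2 - miny).toNat (fun row => row.set (p.1 - minx).toNat 1)) g l, row.length = w) ∧
    (∀ r c, r < g.length → c < w →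
      pvEntry (List.foldl (fun b p => b.modify (p.2 - miny).toNat (fun row => row.set (p.1 - minx).toNat 1)) g l) r c
        = if (minx + (c : Int), miny + (r : Int)) ∈ l then 1 else pvEntry g r c) := by
  induction l with
  | nil => intro g hw _; exact ⟨rfl, hw, fun r c _ _ => by simp⟩
  | cons p t ih =>
    intro g hw hb
    obtain ⟨hx1, hx2, hy1, hy2⟩ := hb p (by simp)
    set g1 := g.modify (p.2 - miny).toNat (fun row => row.set (p.1 - minx).toNat 1) with hg1
    have hlen1 : g1.length = g.length := List.length_modify ..
    have hw1 : ∀ row ∈ g1, row.length = w := by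
      intro row hrow
      obtain ⟨k, hk, hke⟩ := List.mem_iff_getElem.mp hrow
      have hk' : k < g.length := by simpa [hlen1] using hk
      have hgk : row = if (p.2 - miny).toNat = k then (g[k]'hk').set (p.1 - minx).toNat 1 else g[k]'hk' := by
        rw [← hke]; simp only [hg1]; rw [List.getElem_modify]
      rw [hgk]; split
      · rw [List.length_set]; exact hw _ (List.getElem_mem hk')
      · exact hw _ (List.getElem_mem hk')
    have hb1 : ∀ q ∈ t, minx ≤ q.1 ∧ (q.1 - minx).toNat < w ∧ miny ≤ q.2 ∧ (q.2 - miny).toNat < g1.length := by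
      intro q hq; simpa [hlen1] using hb q (by simp [hq])
    obtain ⟨ihlen, ihw, ihe⟩ := ih g1 hw1 hb1
    refine ⟨by simp only [List.foldl_cons]; rw [← hg1, ihlen, hlen1],
            by simpa only [List.foldl_cons, ← hg1] using ihw, ?_⟩
    intro r c hr hc
    simp only [List.foldl_cons, ← hg1]
    rw [ihe r c (by omega) hc,
        pvEntry_modify_set g w r c (p.2 - miny).toNat (p.1 - minx).toNat hw hr hc hy2 hx2]
    have hiff : ((minx + (c : Int), miny + (r : Int)) = p)
        ↔ (r = (p.2 - miny).toNat ∧ c = (p.1 - minx).toNat) := by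
      constructor
      · intro h
        have h1 : minx + (c : Int) = p.1 := congrArg Prod.fst h
        have h2 : miny + (r : Int) = p.2 := congrArg Prod.snd h
        omega
      · intro ⟨h1, h2⟩
        have : minx + (c : Int) = p.1 ∧ miny + (r : Int) = p.2 := by omega
        exact Prod.ext this.1 this.2
    simp only [List.mem_cons]
    by_cases hm : (minx + (c : Int), miny + (r : Int)) ∈ t
    · simp [hm]
    · by_cases he : (minx + (c : Int), miny + (r : Int)) = p
      · rw [if_neg hm, if_pos (Or.inl he), if_pos (hiff.mp he)]
      · rw [if_neg hm, if_neg (fun hx => he (hiff.mpr hx)), if_neg (fun hx => hx.elim he hm)]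

-- ===== VERDICT (by name: the statement is the Claim_ definition above) =====
theorem pixels_to_bitmap_spec : Claim_equal_pixels_to_bitmap := by
  intro pixels _ hpre
  unfold Pre_pixels_to_bitmap at hpre
  unfold Spec_pixels_to_bitmap
  obtain ⟨⟨x0, y0⟩, rest, rfl⟩ : ∃ p rest, pixels = p :: rest := by
    cases pixels with
    | nil => exact absurd rfl hpre
    | cons p rest => exact ⟨p, rest, rfl⟩
  simp only [pixels_to_bitmap, pixels_to_bitmap_alt]
  -- A's four extrema in running-fold form
  rw [show ((x0, y0) :: rest).map (fun p => p.1) = x0 :: rest.map Prod.fst from rfl,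
      show ((x0, y0) :: rest).map (fun p => p.2) = y0 :: rest.map Prod.snd from rfl,
      PySem.List.min?_id_cons, PySem.List.max?_id_cons,
      PySem.List.min?_id_cons, PySem.List.max?_id_cons,
      pvBounds_foldl rest x0 x0 y0 y0]
  simp only [Option.getD_some]
  set minx := (rest.map Prod.fst).foldl min x0 with hminx
  set maxx := (rest.map Prod.fst).foldl max x0 with hmaxx
  set miny := (rest.map Prod.snd).foldl min y0 with hminy
  set maxy := (rest.map Prod.snd).foldl max y0 with hmaxy
  set pixels := ((x0, y0) :: rest : List (Int × Int)) with hpx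
  -- extremal bounds
  have hbnd : ∀ p ∈ pixels, minx ≤ p.1 ∧ p.1 ≤ maxx ∧ miny ≤ p.2 ∧ p.2 ≤ maxy := by
    intro p hp
    have hmx : PySem.List.min? (x0 :: rest.map Prod.fst) (fun v => v) = some minx :=
      PySem.List.min?_id_cons ..
    have hMx : PySem.List.max? (x0 :: rest.map Prod.fst) (fun v => v) = some maxx :=
      PySem.List.max?_id_cons ..
    have hmy : PySem.List.min? (y0 :: rest.map Prod.snd) (fun v => v) = some miny :=
      PySem.List.min?_id_cons ..
    have hMy : PySem.List.max? (y0 :: rest.map Prod.snd) (fun v => v) = some maxy :=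
      PySem.List.max?_id_cons ..
    have hp' := List.mem_cons.mp (hpx ▸ hp)
    have hpx1 : p.1 ∈ x0 :: rest.map Prod.fst := by
      rcases hp' with h | h
      · simp [h]
      · exact List.mem_cons_of_mem _ (List.mem_map_of_mem h)
    have hpy1 : p.2 ∈ y0 :: rest.map Prod.snd := by
      rcases hp' with h | h
      · simp [h]
      · exact List.mem_cons_of_mem _ (List.mem_map_of_mem h)
    exact ⟨by simpa using PySem.List.min?_isMin hmx _ hpx1,
           by simpa using PySem.List.max?_isMax hMx _ hpx1,
           by simpa using PySem.List.min?_isMin hmy _ hpy1,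
           by simpa using PySem.List.max?_isMax hMy _ hpy1⟩
  set w := maxx - minx + 1 with hw
  set h := maxy - miny + 1 with hh
  set bmp0 := List.replicate h.toNat (List.replicate w.toNat (0 : Int)) with hbmp0
  have hw0 : ∀ row ∈ bmp0, row.length = w.toNat := by
    intro row hrow
    rw [(List.eq_of_mem_replicate hrow : row = List.replicate w.toNat 0)]
    exact List.length_replicate
  have hb0 : ∀ p ∈ pixels, minx ≤ p.1 ∧ (p.1 - minx).toNat < w.toNat ∧ miny ≤ p.2 ∧ (p.2 - miny).toNat < bmp0.length := by
    intro p hp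
    obtain ⟨h1, h2, h3, h4⟩ := hbnd p hp
    have hx0b := hbnd (x0, y0) (by simp [hpx])
    refine ⟨h1, by omega, h3, ?_⟩
    rw [hbmp0, List.length_replicate]; omega
  obtain ⟨hAlen, hAw, hAe⟩ := pv_mark minx miny w.toNat pixels bmp0 hw0 hb0
  set bmpA := List.foldl (fun b p => b.modify (p.2 - miny).toNat (fun row => row.set (p.1 - minx).toNat 1)) bmp0 pixels with hbmpA
  set pts : PySem.Set (Int × Int) := PySem.Set.ofList pixels with hpts
  have hpts_mem : ∀ q : Int × Int, q ∈ pts ↔ q ∈ pixels := fun q =>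
    PySem.Set.mem_ofList pixels q
  refine Prod.ext ?_ rfl
  show bmpA = (PySem.List.pyRange miny (maxy + 1) 1).map (fun y =>
    (PySem.List.pyRange minx (maxx + 1) 1).map (fun x =>
      if ((x, y) : Int × Int) ∈ pts then (1 : Int) else 0))
  rw [PySem.List.pyRange_one miny (maxy + 1), PySem.List.pyRange_one minx (maxx + 1)]
  have hhw : (maxy + 1 - miny).toNat = h.toNat ∧ (maxx + 1 - minx).toNat = w.toNat := by omega
  rw [hhw.1, hhw.2]
  apply List.ext_getElem
  · rw [hAlen, hbmp0, List.length_replicate, List.length_map, List.length_map, List.length_range]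
  · intro r hr1 hr2
    have hr : r < h.toNat := by simpa using hr2
    rw [List.getElem_map, List.getElem_map, List.getElem_range]
    apply List.ext_getElem
    · rw [List.length_map, List.length_map, List.length_range]
      exact hAw _ (List.getElem_mem hr1)
    · intro c hc1 hc2
      have hc : c < w.toNat := by simpa using hc2
      rw [List.getElem_map, List.getElem_map, List.getElem_range]
      have hEntry : pvEntry bmpA r c = bmpA[r][c] := by
        unfold pvEntry
        simp only [List.getD_eq_getElem?_getD]
        rw [List.getElem?_eq_getElem hr1]
        simp only [Option.getD_some]
        rw [List.getElem?_eq_getElem hc1, Option.getD_some]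
      have h0 : pvEntry bmp0 r c = 0 := by
        unfold pvEntry
        rw [hbmp0]
        simp [List.getD_eq_getElem?_getD, List.getElem?_replicate, hr]
        split <;> simp
      rw [← hEntry, hAe r c (by rw [hbmp0, List.length_replicate]; exact hr) hc, h0]
      show _ = (fun x => if ((x, miny + (r:Int)) : Int × Int) ∈ pts then (1:Int) else 0) (minx + (c:Int))
      simp only
      by_cases hm : (minx + (c : Int), miny + (r : Int)) ∈ pixels
      · rw [if_pos hm, if_pos ((hpts_mem _).mpr hm)]
      · rw [if_neg hm, if_neg (fun hx => hm ((hpts_mem _).mp hx))]
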